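-- pv_equiv track=rewrite | github.com/NetworkAnalyzer/algorithmClass | original.py | evaluate
-- ===== SOURCE A (Python) =====
-- MAX_WEIGHT = 60
--
-- TYPE_WEIGHT = 1
--
-- TYPE_PRICE = 2
--
-- MIN_VALUE = 1
--
-- weights = [
--     9, 7, 8, 2, 10, 7, 7, 8, 5, 4, 7, 5, 7, 5, 9, 9, 9, 8, 8, 2, 7, 7, 9, 8, 4, 7,
--     3, 9, 7, 7, 9, 5, 10, 7, 10, 10, 7, 10, 10, 10, 3, 8, 3, 4, 2, 2, 5, 3, 9, 2
-- ]
--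
-- prices = [
--     20, 28, 2, 28, 15, 28, 21, 7, 28, 12, 21, 4, 31, 28, 24, 36, 33, 2, 25, 21, 35, 14, 36, 25, 12,
--     14, 40, 36, 2, 28, 33, 40, 22, 2, 18, 22, 14, 22, 15, 22, 40, 7, 4, 21, 21, 28, 40, 4, 24, 21
-- ]
--
-- def evaluate(populations):
--     values = []
--
--     for individual in populations:
--         total_weight = calc_total_value(individual, TYPE_WEIGHT)
--         total_value = calc_total_value(individual, TYPE_PRICE)
--
--         if total_weight <= MAX_WEIGHT:
--             values.append(total_value)
--         else:
--             values.append(MIN_VALUE)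
--
--     return values
--
-- def calc_total_value(array, type):
--     sum = 0
--
--     if type == TYPE_WEIGHT:
--         for i in array:
--             sum += weights[i]
--     else:
--         for i in array:
--             sum += prices[i]
--
--     return sum
-- ===== SOURCE B (Python) =====
-- MAX_WEIGHT = 60
--
-- MIN_VALUE = 1
--
-- weights = [
--     9, 7, 8, 2, 10, 7, 7, 8, 5, 4, 7, 5, 7, 5, 9, 9, 9, 8, 8, 2, 7, 7, 9, 8, 4, 7,
--     3, 9, 7, 7, 9, 5, 10, 7, 10, 10, 7, 10, 10, 10, 3, 8, 3, 4, 2, 2, 5, 3, 9, 2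
-- ]
--
-- prices = [
--     20, 28, 2, 28, 15, 28, 21, 7, 28, 12, 21, 4, 31, 28, 24, 36, 33, 2, 25, 21, 35, 14, 36, 25, 12,
--     14, 40, 36, 2, 28, 33, 40, 22, 2, 18, 22, 14, 22, 15, 22, 40, 7, 4, 21, 21, 28, 40, 4, 24, 21
-- ]
--
-- def evaluate(populations):
--     # Multiset view: count each index's multiplicity once, then take
--     # multiplicity-weighted sums over the DISTINCT indices only; the
--     # price sum is skipped entirely when the individual is overweight.
--     def value_of(individual):
--         counts = {}
--         for i in individual:
--             counts[i] = counts.get(i, 0) + 1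
--         total_weight = sum(n * weights[i] for i, n in counts.items())
--         if total_weight > MAX_WEIGHT:
--             return MIN_VALUE
--         return sum(n * prices[i] for i, n in counts.items())
--
--     return [value_of(individual) for individual in populations]
-- ===== Notes on version B (the rewrite author's own statement) =====
-- stated objective: alternative
-- what changed: B replaces A's per-element helper scans by a multiset algorithm: it builds a multiplicity dictionary (Counter) per individual, computes the weight as a multiplicity-weighted sum over the distinct indices only, and skips the price sum entirely when the individual is overweight.
import Mathlib
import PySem

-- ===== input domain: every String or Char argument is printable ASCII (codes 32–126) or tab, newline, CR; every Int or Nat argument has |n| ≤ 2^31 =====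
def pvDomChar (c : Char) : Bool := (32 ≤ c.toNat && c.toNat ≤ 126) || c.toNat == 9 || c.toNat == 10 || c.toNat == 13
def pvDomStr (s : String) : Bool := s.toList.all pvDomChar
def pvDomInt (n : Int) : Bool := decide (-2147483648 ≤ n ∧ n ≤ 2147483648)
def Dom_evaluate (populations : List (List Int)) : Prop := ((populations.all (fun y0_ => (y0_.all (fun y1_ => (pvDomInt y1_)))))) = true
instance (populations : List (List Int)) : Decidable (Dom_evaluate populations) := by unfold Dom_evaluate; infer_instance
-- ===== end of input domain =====

-- B replaces A's per-element helper scans by a multiset algorithm: a multiplicity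
-- dictionary per individual, with multiplicity-weighted sums over distinct indices
-- only, skipping the price sum when overweight (objective: alternative).

def pvWeights : List Int :=
  [9, 7, 8, 2, 10, 7, 7, 8, 5, 4, 7, 5, 7, 5, 9, 9, 9, 8, 8, 2, 7, 7, 9, 8, 4, 7,
   3, 9, 7, 7, 9, 5, 10, 7, 10, 10, 7, 10, 10, 10, 3, 8, 3, 4, 2, 2, 5, 3, 9, 2]

def pvPrices : List Int :=
  [20, 28, 2, 28, 15, 28, 21, 7, 28, 12, 21, 4, 31, 28, 24, 36, 33, 2, 25, 21, 35, 14, 36, 25, 12,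
   14, 40, 36, 2, 28, 33, 40, 22, 2, 18, 22, 14, 22, 15, 22, 40, 7, 4, 21, 21, 28, 40, 4, 24, 21]

-- ===== PORT A =====
-- weights[i]/prices[i] are ported with pyGetD … 0; Pre_evaluate keeps every index in
-- range -50 ≤ i < 50, where pyGetD agrees with Python indexing (IndexError outside).
def calc_total_value (array : List Int) (type : Int) : Int :=
  if type == 1 then
    array.foldl (fun s i => s + PySem.List.pyGetD pvWeights i 0) 0
  else
    array.foldl (fun s i => s + PySem.List.pyGetD pvPrices i 0) 0

def evaluate (populations : List (List Int)) : List Int :=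
  populations.foldl
    (fun values individual =>
      let total_weight := calc_total_value individual 1
      let total_value := calc_total_value individual 2
      if total_weight ≤ 60 then values ++ [total_value] else values ++ [1])
    []

-- ===== PORT B =====
def value_of (individual : List Int) : Int :=
  let counts := individual.foldl (fun d x => d.insert x (d.getD x 0 + 1)) PySem.Dict.empty
  let total_weight := (counts.items.map (fun p => p.2 * PySem.List.pyGetD pvWeights p.1 0)).sum
  if total_weight > 60 then 1
  else (counts.items.map (fun p => p.2 * PySem.List.pyGetD pvPrices p.1 0)).sum

def evaluate_alt (populations : List (List Int)) : List Int :=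
  populations.map value_of

-- ===== PRECONDITION & SPEC =====
-- Pre_ excludes exactly the inputs on which Python A raises IndexError: an index outside -50 ≤ i < 50.
def Pre_evaluate (populations : List (List Int)) : Prop :=
  ∀ ind ∈ populations, ∀ i ∈ ind, PySem.Raise.InRange 50 i
instance (populations : List (List Int)) : Decidable (Pre_evaluate populations) := by
  unfold Pre_evaluate; infer_instance

def pvWitness_evaluate : List (List Int) := [[0, 3, -1], [5, 5, 5, 5, 5, 5, 5, 5, 5], []]

def Spec_evaluate (populations : List (List Int)) (out : List Int) : Prop := out = evaluate_alt populations
instance (populations : List (List Int)) (out : List Int) : Decidable (Spec_evaluate populations out) := by unfold Spec_evaluate; infer_instance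

-- ===== CLAIM =====
def Claim_equal_evaluate : Prop := ∀ (populations : List (List Int)), Dom_evaluate populations → Pre_evaluate populations → Spec_evaluate populations (evaluate populations)

-- ===== LEMMAS AND PROOFS =====

-- On a Nodup list, the indicator-sum at x picks out g x (0 if x is absent).
theorem sum_map_indicator (s : List Int) (g : Int → Int) (x : Int) (hnd : s.Nodup) :
    (s.map (fun k => if k = x then g k else 0)).sum = if x ∈ s then g x else 0 := by
  induction s with
  | nil => simp
  | cons a t ih =>
      simp only [List.nodup_cons] at hnd
      simp only [List.map_cons, List.sum_cons, ih hnd.2, List.mem_cons]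
      by_cases hax : a = x
      · subst hax
        simp [hnd.1]
      · simp [hax, Ne.symm hax]

-- The multiplicity-weighted sum over the distinct elements equals the element-wise sum.
theorem wsum_eq (f : Int → Int) (l : List Int) :
    ((PySem.Set.ofList l).map (fun k => (l.count k : Int) * f k)).sum = (l.map f).sum := by
  induction l using List.reverseRecOn with
  | nil => simp [PySem.Set.ofList]
  | append_singleton l x ih =>
      rw [PySem.Set.ofList_append_singleton]
      have hcnt : ∀ k : Int, ((l ++ [x]).count k : Int) * f k
          = (l.count k : Int) * f k + (if k = x then f k else 0) := by
        intro k
        rcases eq_or_ne k x with h | h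
        · subst h; simp [List.count_append]; ring
        · have h0 : [x].count k = 0 := List.count_eq_zero_of_not_mem (by simp [h])
          simp only [List.count_append, h0, if_neg h, add_zero]
      by_cases hx : x ∈ PySem.Set.ofList l
      · rw [PySem.Set.add_of_mem hx]
        calc ((PySem.Set.ofList l).map (fun k => ((l ++ [x]).count k : Int) * f k)).sum
            = ((PySem.Set.ofList l).map
                (fun k => (l.count k : Int) * f k + (if k = x then f k else 0))).sum := by
              exact congrArg List.sum (List.map_congr_left (fun k _ => hcnt k))
          _ = ((PySem.Set.ofList l).map (fun k => (l.count k : Int) * f k)).sum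
              + ((PySem.Set.ofList l).map (fun k => if k = x then f k else 0)).sum :=
              PySem.List.sum_map_add_int _ _ _
          _ = (l.map f).sum + f x := by
              rw [ih, sum_map_indicator _ _ _ (PySem.Set.nodup_ofList l), if_pos hx]
          _ = ((l ++ [x]).map f).sum := by simp
      · rw [PySem.Set.add_of_not_mem hx]
        have hxl : x ∉ l := fun h => hx ((PySem.Set.mem_ofList l x).mpr h)
        calc ((PySem.Set.ofList l ++ [x]).map (fun k => ((l ++ [x]).count k : Int) * f k)).sum
            = ((PySem.Set.ofList l).map (fun k => ((l ++ [x]).count k : Int) * f k)).sum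
              + ((l ++ [x]).count x : Int) * f x := by simp
          _ = ((PySem.Set.ofList l).map (fun k => (l.count k : Int) * f k)).sum + f x := by
              congr 1
              · apply congrArg List.sum
                apply List.map_congr_left
                intro k hk
                have hkx : k ≠ x := by
                  rintro rfl; exact hx hk
                have h0 : [x].count k = 0 := List.count_eq_zero_of_not_mem (by simp [hkx])
                simp [List.count_append, h0]
              · simp [List.count_append, List.count_eq_zero_of_not_mem hxl]
          _ = ((l ++ [x]).map f).sum := by rw [ih]; simp

-- the per-individual values agree
theorem value_eq (ind : List Int) :
    (if calc_total_value ind 1 ≤ 60 then calc_total_value ind 2 else 1) = value_of ind := by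
  simp only [value_of, calc_total_value, PySem.Dict.foldl_insert_getD_add_one_eq_counter,
    PySem.Dict.items_counter, List.map_map]
  have hw : ((PySem.Set.ofList ind).map
      ((fun p : Int × Int => p.2 * PySem.List.pyGetD pvWeights p.1 0) ∘
        fun k => (k, (ind.count k : Int)))).sum
      = (ind.map (fun i => PySem.List.pyGetD pvWeights i 0)).sum := wsum_eq _ ind
  have hp : ((PySem.Set.ofList ind).map
      ((fun p : Int × Int => p.2 * PySem.List.pyGetD pvPrices p.1 0) ∘
        fun k => (k, (ind.count k : Int)))).sum
      = (ind.map (fun i => PySem.List.pyGetD pvPrices i 0)).sum := wsum_eq _ ind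
  rw [hw, hp]
  simp only [show ((2 : Int) == 1) = false by decide, beq_self_eq_true, if_true,
    Bool.false_eq_true, if_false]
  rw [PySem.List.foldl_add, PySem.List.foldl_add]
  simp only [zero_add]
  by_cases h : (ind.map (fun i => PySem.List.pyGetD pvWeights i 0)).sum ≤ 60
  · rw [if_pos h, if_neg (by omega)]
  · rw [if_neg h, if_pos (by omega)]

-- ===== VERDICT =====
theorem evaluate_spec : Claim_equal_evaluate := by
  intro populations _ _
  unfold Spec_evaluate evaluate evaluate_alt
  have : populations.foldl
      (fun values individual =>
        let total_weight := calc_total_value individual 1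
        let total_value := calc_total_value individual 2
        if total_weight ≤ 60 then values ++ [total_value] else values ++ [1])
      [] = populations.foldl (fun values individual => values ++ [value_of individual]) [] := by
    apply PySem.List.foldl_congr_mem
    intro acc ind _
    simp only [← value_eq ind]
    split_ifs <;> rfl
  rw [this, PySem.List.foldl_append_singleton_eq_map]
  simp
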